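-- pv_equiv track=rewrite | github.com/m-szymon/summit25_hackaton | wikipedia/multistream.py | _group_index_entries
-- ===== SOURCE A (Python) =====
-- from collections import defaultdict
--
-- def _group_index_entries(entries):
--     """
--     Helper to group index entries by offset and return ordered offsets.
--     """
--     offset_groups = defaultdict(list)
--     for offset, article_id, _ in entries:
--         offset_groups[int(offset)].append(article_id)
--     sorted_offsets = [int(offset) for offset, _, _ in entries]
--     seen_offsets = set()
--     ordered_offsets = []
--     for o in sorted_offsets:
--         if o not in seen_offsets:
--             ordered_offsets.append(o)
--             seen_offsets.add(o)
--     return offset_groups, ordered_offsets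
-- ===== SOURCE B (Python) =====
-- def _group_index_entries(entries):
--     """
--     Alternative decomposition: first collect the ordered unique offsets,
--     then build each group in one go by scanning entries for that offset
--     (group-by-key via per-key filter instead of incremental dict appends).
--     """
--     ordered_offsets = []
--     for offset, _, _ in entries:
--         o = int(offset)
--         if o not in ordered_offsets:
--             ordered_offsets.append(o)
--     offset_groups = {
--         o: [aid for off, aid, _ in entries if int(off) == o]
--         for o in ordered_offsets
--     }
--     return offset_groups, ordered_offsets
-- ===== Notes on version B (the rewrite author's own statement) =====
-- stated objective: alternative
-- what changed: B inverts the structure: it first computes the ordered unique offsets, then builds the whole group for each offset by filtering the entries for that key, instead of A's incremental defaultdict-append pass followed by a second offsets list plus seen-set dedup loop.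
import Mathlib
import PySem

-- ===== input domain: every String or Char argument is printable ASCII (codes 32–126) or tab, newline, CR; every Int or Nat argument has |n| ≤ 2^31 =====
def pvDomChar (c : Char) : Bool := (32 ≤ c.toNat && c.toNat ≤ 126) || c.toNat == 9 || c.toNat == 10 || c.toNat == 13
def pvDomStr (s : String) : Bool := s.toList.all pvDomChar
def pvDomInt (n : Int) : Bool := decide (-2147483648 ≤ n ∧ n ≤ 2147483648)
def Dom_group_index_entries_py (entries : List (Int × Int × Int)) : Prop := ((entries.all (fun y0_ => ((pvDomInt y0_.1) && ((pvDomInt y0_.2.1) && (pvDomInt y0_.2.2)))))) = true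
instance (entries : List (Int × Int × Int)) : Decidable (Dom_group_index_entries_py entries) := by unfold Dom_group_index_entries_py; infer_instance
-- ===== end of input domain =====

-- B first computes the ordered unique offsets, then builds each group by filtering
-- the entries per offset, instead of A's incremental dict pass + dedup loop (objective: alternative).


-- ===== PORT A =====
-- defaultdict(list): offset_groups[int(offset)].append(article_id)  ==  modify with default []
def group_index_entries_py (entries : List (Int × Int × Int)) : (List (Int × List Int)) × List Int :=
  let offset_groups : PySem.Dict Int (List Int) :=
    entries.foldl (fun d e => d.modify e.1 [] (fun l => l ++ [e.2.1])) PySem.Dict.empty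
  let sorted_offsets : List Int := entries.map (fun e => e.1)
  let st : List Int × PySem.Set Int :=
    sorted_offsets.foldl
      (fun (p : List Int × PySem.Set Int) o =>
        if PySem.Set.contains p.2 o then p else (p.1 ++ [o], PySem.Set.add p.2 o))
      ([], PySem.Set.ofList [])
  (offset_groups.items, st.1)

-- ===== PORT B =====
def group_index_entries_py_alt (entries : List (Int × Int × Int)) : (List (Int × List Int)) × List Int :=
  let ordered_offsets : List Int :=
    entries.foldl (fun acc e => if acc.contains e.1 then acc else acc ++ [e.1]) []
  let offset_groups : List (Int × List Int) :=
    ordered_offsets.map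
      (fun o => (o, (entries.filter (fun e => e.1 == o)).map (fun e => e.2.1)))
  (offset_groups, ordered_offsets)

-- ===== PRECONDITION & SPEC =====
def Spec_group_index_entries_py (entries : List (Int × Int × Int)) (out : (List (Int × List Int)) × List Int) : Prop := out = group_index_entries_py_alt entries
instance (entries : List (Int × Int × Int)) (out : (List (Int × List Int)) × List Int) : Decidable (Spec_group_index_entries_py entries out) := by unfold Spec_group_index_entries_py; infer_instance

-- ===== CLAIM (what is proved, stated in full; the proofs are below) =====
def Claim_equal_group_index_entries_py : Prop := ∀ (entries : List (Int × Int × Int)), Dom_group_index_entries_py entries → Spec_group_index_entries_py entries (group_index_entries_py entries)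

-- ===== LEMMAS AND PROOFS =====

-- B's dedup fold is Set.ofList of the offsets (A's seen-set loop builds the same list).
theorem alt_offsets_eq (entries : List (Int × Int × Int)) :
    entries.foldl (fun acc e => if acc.contains e.1 then acc else acc ++ [e.1]) [] =
      PySem.Set.ofList (entries.map (fun e => e.1)) := by
  rw [← PySem.Set.update_empty, PySem.Set.update_map_eq_foldl_add]
  rfl

-- A's dedup loop (list + seen set) returns the same list as Set.ofList, given the
-- accumulator list and set have the same members and the list is the acc so far.
theorem a_offsets_eq (l : List Int) (acc : List Int) (s : PySem.Set Int)
    (hm : ∀ o : Int, PySem.Set.contains s o = acc.contains o) :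
    (l.foldl
      (fun (p : List Int × PySem.Set Int) o =>
        if PySem.Set.contains p.2 o then p else (p.1 ++ [o], PySem.Set.add p.2 o))
      (acc, s)).1 =
      l.foldl (fun acc o => if acc.contains o then acc else acc ++ [o]) acc := by
  induction l generalizing acc s with
  | nil => rfl
  | cons x xs ih =>
    simp only [List.foldl_cons, hm x]
    by_cases h : acc.contains x = true
    · rw [if_pos h, if_pos h]; exact ih acc s hm
    · simp only [Bool.not_eq_true] at h
      have h' : x ∉ acc := by
        simp only [List.contains_eq_mem, decide_eq_false_iff_not] at h; exact h
      rw [if_neg (by simp [h']), if_neg (by simp [h'])]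
      apply ih
      intro o
      by_cases ho : o = x
      · subst ho
        simp [PySem.Set.contains_eq_listContains, PySem.Set.mem_add]
      · have : PySem.Set.contains (PySem.Set.add s x) o = PySem.Set.contains s o := by
          simp only [PySem.Set.contains_eq_listContains, List.contains_eq_mem,
            decide_eq_decide, PySem.Set.mem_add]
          tauto
        rw [this, hm o]
        simp [List.contains_eq_mem, List.mem_append, ho]

-- ===== VERDICT (by name: the statement is the Claim_ definition above) =====
theorem group_index_entries_py_spec : Claim_equal_group_index_entries_py := by
  intro entries _
  unfold Spec_group_index_entries_py group_index_entries_py group_index_entries_py_alt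
  simp only []
  -- the two ordered-offset lists agree
  have hoff :
      ((entries.map (fun e => e.1)).foldl
        (fun (p : List Int × PySem.Set Int) o =>
          if PySem.Set.contains p.2 o then p else (p.1 ++ [o], PySem.Set.add p.2 o))
        ([], PySem.Set.ofList [])).1 =
        entries.foldl (fun acc e => if acc.contains e.1 then acc else acc ++ [e.1]) [] := by
    rw [a_offsets_eq _ [] (PySem.Set.ofList []) (by intro o; rfl), List.foldl_map]
  -- the dict, rewritten as a fold over (offset, article_id) pairs
  have hdict :
      entries.foldl (fun d e => d.modify e.1 [] (fun l => l ++ [e.2.1])) PySem.Dict.empty =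
        (entries.map (fun e => (e.1, e.2.1))).foldl
          (fun d p => d.modify p.1 [] (fun l => l ++ [p.2])) PySem.Dict.empty := by
    rw [List.foldl_map]
  set D := entries.foldl (fun d e => d.modify e.1 [] (fun l => l ++ [e.2.1])) PySem.Dict.empty with hD
  have hkeys : D.keys =
      entries.foldl (fun acc e => if acc.contains e.1 then acc else acc ++ [e.1]) [] := by
    rw [hD, PySem.Dict.keys_foldl_modify_key entries (fun e => e.1), alt_offsets_eq]
    rfl
  have hnodup : D.keys.Nodup := by
    rw [hkeys, alt_offsets_eq]; exact PySem.Set.nodup_ofList _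
  have hgetD : ∀ k : Int, D.getD k [] =
      (entries.filter (fun e => e.1 == k)).map (fun e => e.2.1) := by
    intro k
    rw [hdict, PySem.Dict.getD_foldl_modify_append, PySem.Dict.getD_empty]
    rw [List.filter_map, List.map_map]
    rfl
  have hitems : D.items =
      (entries.foldl (fun acc e => if acc.contains e.1 then acc else acc ++ [e.1]) []).map
        (fun o => (o, (entries.filter (fun e => e.1 == o)).map (fun e => e.2.1))) := by
    rw [PySem.Dict.items_eq_map_keys D hnodup [], hkeys]
    apply List.map_congr_left
    intro o _
    rw [hgetD o]
  rw [hitems, hoff]
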